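-- pv_equiv track=rewrite | github.com/kbaikov/adventofcode2018 | day05.py | process_stack
-- ===== SOURCE A (Python) =====
-- from collections import Counter, deque
--
-- def react(pair):
--     x, y = pair
--     if x == y:
--         return False
--     if x == y.upper() or y == x.upper():
--         return True
--     return False
--
-- def process_stack(pattern):
--     """Pop if reacts, add if not.
--
--     idea taken from: https://steadbytes.com/blog/advent-of-code-2018/05/"""
--     stack = deque()
--
--     for char in pattern:
--         if stack and react((char, stack[-1])):
--             stack.pop()
--         else:
--             stack.append(char)
--     return len(stack)
-- ===== SOURCE B (Python) =====
-- def _reacts(a, b):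
--     return a != b and (a == b.upper() or b == a.upper())
--
--
-- def process_stack(pattern):
--     """Repeated parallel sweeps: each pass removes every non-overlapping
--     reacting pair found left to right; repeat until a pass removes nothing."""
--     s = list(pattern)
--     changed = True
--     while changed:
--         out = []
--         changed = False
--         i = 0
--         n = len(s)
--         while i < n:
--             if i + 1 < n and _reacts(s[i], s[i + 1]):
--                 i += 2
--                 changed = True
--             else:
--                 out.append(s[i])
--                 i += 1
--         s = out
--     return len(s)
-- ===== Notes on version B (the rewrite author's own statement) =====
-- stated objective: alternative
-- what changed: Replaced the one-pass deque stack with repeated left-to-right sweeps that each delete all non-overlapping reacting pairs, iterated until a sweep deletes nothing (correct because the reduction is confluent).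
import Mathlib
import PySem

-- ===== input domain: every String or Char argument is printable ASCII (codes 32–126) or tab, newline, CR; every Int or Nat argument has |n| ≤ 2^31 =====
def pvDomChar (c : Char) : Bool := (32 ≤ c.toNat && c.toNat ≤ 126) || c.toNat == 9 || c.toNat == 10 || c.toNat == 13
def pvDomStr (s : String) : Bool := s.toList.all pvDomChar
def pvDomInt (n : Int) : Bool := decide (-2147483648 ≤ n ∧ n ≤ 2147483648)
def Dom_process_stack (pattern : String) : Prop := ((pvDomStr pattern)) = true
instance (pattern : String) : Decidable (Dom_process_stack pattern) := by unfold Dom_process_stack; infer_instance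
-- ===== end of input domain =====

-- B replaces A's one-pass stack with repeated whole-string sweeps, each deleting all
-- non-overlapping reacting pairs, until a sweep deletes nothing (objective: alternative).

-- ===== PORT A =====
def react (pair : Char × Char) : Bool :=
  if pair.1 = pair.2 then false
  else if pair.1 = PySem.Chars.upperChar pair.2 || pair.2 = PySem.Chars.upperChar pair.1 then true
  else false

def pvStepA (stack : List Char) (char : Char) : List Char :=
  match stack.getLast? with
  | some top => if react (char, top) then stack.dropLast else stack ++ [char]
  | none => stack ++ [char]

def process_stack (pattern : String) : Int :=
  ((pattern.toList.foldl pvStepA []).length : Int)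

-- ===== PORT B =====
def pvReacts (a b : Char) : Bool :=
  a != b && (a == PySem.Chars.upperChar b || b == PySem.Chars.upperChar a)

-- one sweep: drop every non-overlapping reacting pair, left to right; flag = dropped any
def pvSweep : List Char → List Char × Bool
  | x :: y :: r => if pvReacts x y then ((pvSweep r).1, true)
      else ((x :: (pvSweep (y :: r)).1), (pvSweep (y :: r)).2)
  | l => (l, false)

theorem pvSweep_len_le : ∀ (l : List Char), (pvSweep l).1.length ≤ l.length
  | [] => by simp [pvSweep]
  | [x] => by simp [pvSweep]
  | x :: y :: r => by
      by_cases h : pvReacts x y = true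
      · have := pvSweep_len_le r
        simp only [pvSweep, if_pos h, List.length_cons]
        omega
      · have := pvSweep_len_le (y :: r)
        simp only [pvSweep, if_neg h, List.length_cons] at this ⊢
        omega

theorem pvSweep_len_lt : ∀ (l : List Char), (pvSweep l).2 = true → (pvSweep l).1.length < l.length
  | [], h => by simp [pvSweep] at h
  | [x], h => by simp [pvSweep] at h
  | x :: y :: r, h => by
      by_cases hr : pvReacts x y = true
      · have := pvSweep_len_le r
        simp only [pvSweep, if_pos hr, List.length_cons]
        omega
      · simp only [pvSweep, if_neg hr] at h
        have := pvSweep_len_lt (y :: r) h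
        simp only [pvSweep, if_neg hr, List.length_cons] at this ⊢
        omega

def pvReduceB (l : List Char) : List Char :=
  if h : (pvSweep l).2 = true then pvReduceB (pvSweep l).1 else (pvSweep l).1
termination_by l.length
decreasing_by exact pvSweep_len_lt l h

def process_stack_alt (pattern : String) : Int :=
  ((pvReduceB pattern.toList).length : Int)

-- ===== PRECONDITION & SPEC =====
def Spec_process_stack (pattern : String) (out : Int) : Prop := out = process_stack_alt pattern
instance (pattern : String) (out : Int) : Decidable (Spec_process_stack pattern out) := by unfold Spec_process_stack; infer_instance

-- ===== CLAIM (what is proved, stated in full; the proofs are below) =====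
def Claim_equal_process_stack : Prop := ∀ (pattern : String), Dom_process_stack pattern → Spec_process_stack pattern (process_stack pattern)

-- ===== LEMMAS AND PROOFS =====

-- the normal form of the polymer: push each char from the right onto a reduced suffix
def pvPush (c : Char) (m : List Char) : List Char :=
  match m with
  | [] => [c]
  | d :: t => if pvReacts c d then t else c :: d :: t

def pvNF (l : List Char) : List Char := l.foldr pvPush []

-- no adjacent reacting pair
def pvNoReact : List Char → Bool
  | x :: y :: r => !pvReacts x y && pvNoReact (y :: r)
  | _ => true

-- A's react on a pair is B's reacts
theorem react_eq (a b : Char) : react (a, b) = pvReacts a b := by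
  by_cases h : a = b
  · subst h; simp [react, pvReacts]
  · have hb : (a != b) = true := by simp only [bne_iff_ne, ne_eq]; exact h
    simp only [react]
    rw [if_neg h]
    simp only [pvReacts, hb, Bool.true_and]
    by_cases h1 : a = PySem.Chars.upperChar b
    · simp [h1]
    · by_cases h2 : b = PySem.Chars.upperChar a
      · simp [h2]
      · simp [h1, h2]

theorem char_toNat_inj {a b : Char} (h : a.toNat = b.toNat) : a = b :=
  Char.ext (UInt32.toNat_inj.mp h)

theorem islower_bounds {b : Char} (h : PySem.Chars.islower b = true) :
    97 ≤ b.toNat ∧ b.toNat ≤ 122 := by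
  simp only [PySem.Chars.islower, Bool.and_eq_true, decide_eq_true_eq, Char.le_def,
    UInt32.le_iff_toNat_le] at h
  exact h

-- a = upperChar b forces a = b or the arithmetic lower/upper relation
theorem upper_cases {a b : Char} (h : a = PySem.Chars.upperChar b) :
    a = b ∨ (97 ≤ b.toNat ∧ b.toNat ≤ 122 ∧ a.toNat + 32 = b.toNat) := by
  by_cases hl : PySem.Chars.islower b = true
  · obtain ⟨hb1, hb2⟩ := islower_bounds hl
    right
    refine ⟨hb1, hb2, ?_⟩
    have hv : (b.toNat - 32).isValidChar := Or.inl (by omega)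
    have ha : a.toNat = b.toNat - 32 := by
      rw [h]
      unfold PySem.Chars.upperChar
      rw [if_pos hl, Char.toNat_ofNat, if_pos hv]
    omega
  · left
    rw [h]
    unfold PySem.Chars.upperChar
    rw [if_neg hl]

theorem reacts_arith {a b : Char} (h : pvReacts a b = true) :
    (97 ≤ b.toNat ∧ b.toNat ≤ 122 ∧ a.toNat + 32 = b.toNat) ∨
    (97 ≤ a.toNat ∧ a.toNat ≤ 122 ∧ b.toNat + 32 = a.toNat) := by
  simp only [pvReacts, Bool.and_eq_true, bne_iff_ne, ne_eq, Bool.or_eq_true, beq_iff_eq] at h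
  obtain ⟨hne, h | h⟩ := h
  · rcases upper_cases h with h' | h'
    · exact absurd h' hne
    · exact Or.inl h'
  · rcases upper_cases h with h' | h'
    · exact absurd h'.symm hne
    · exact Or.inr h'

theorem reacts_symm (a b : Char) : pvReacts a b = pvReacts b a := by
  by_cases h : a = b
  · subst h; rfl
  · have h1 : (a != b) = true := by simp only [bne_iff_ne, ne_eq]; exact h
    have h2 : (b != a) = true := by simp only [bne_iff_ne, ne_eq]; exact Ne.symm h
    simp only [pvReacts, h1, h2, Bool.true_and]
    exact Bool.or_comm _ _

theorem reacts_unique {a b c : Char} (h1 : pvReacts a b = true) (h2 : pvReacts c b = true) :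
    a = c := by
  rcases reacts_arith h1 with h1 | h1 <;> rcases reacts_arith h2 with h2 | h2 <;>
    exact char_toNat_inj (by omega)

theorem push_noReact (c : Char) (m : List Char) (h : pvNoReact m = true) :
    pvNoReact (pvPush c m) = true := by
  match m with
  | [] => simp [pvPush, pvNoReact]
  | [d] =>
      simp only [pvPush]
      split
      · simp [pvNoReact]
      · simp_all [pvNoReact]
  | d :: e :: t =>
      simp only [pvPush]
      split
      · simp only [pvNoReact, Bool.and_eq_true] at h
        exact h.2
      · simp_all [pvNoReact]

theorem noReact_nf (l : List Char) : pvNoReact (pvNF l) = true := by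
  induction l with
  | nil => simp [pvNF, pvNoReact]
  | cons x l ih => exact push_noReact x _ ih

theorem push_push_cancel {x y : Char} (hxy : pvReacts x y = true) {m : List Char}
    (hm : pvNoReact m = true) : pvPush x (pvPush y m) = m := by
  match m with
  | [] => simp [pvPush, hxy]
  | e :: m' =>
      simp only [pvPush]
      by_cases hye : pvReacts y e = true
      · -- y cancels with e; then x = e and x does not react with the head of m'
        have hxe : x = e := reacts_unique hxy (by rw [reacts_symm]; exact hye)
        subst hxe
        simp only [hye, if_true]
        match m' with
        | [] => simp [pvPush]
        | f :: t =>
            simp only [pvNoReact, Bool.and_eq_true, Bool.not_eq_true'] at hm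
            simp [pvPush, hm.1]
      · simp [hye, pvPush, hxy]

theorem nf_fix {l : List Char} (h : pvNoReact l = true) : pvNF l = l := by
  induction l with
  | nil => rfl
  | cons x l ih =>
      match l, h with
      | [], _ => rfl
      | y :: r, h =>
          simp only [pvNoReact, Bool.and_eq_true, Bool.not_eq_true'] at h
          have : pvNF (y :: r) = y :: r := ih (by simpa [pvNoReact] using h.2)
          show pvPush x (pvNF (y :: r)) = x :: y :: r
          rw [this]
          simp [pvPush, h.1]

-- ===== A side: the stack fold computes pvNF =====
def pvRpush : List Char → Char → List Char
  | [], c => [c]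
  | [d], c => if pvReacts c d then [] else [d, c]
  | d :: e :: t, c => d :: pvRpush (e :: t) c

theorem stepA_eq : ∀ (s : List Char) (c : Char), pvStepA s c = pvRpush s c
  | [], c => by simp [pvStepA, pvRpush]
  | [d], c => by simp [pvStepA, pvRpush, react_eq]
  | d :: e :: t, c => by
      cases hg : (e :: t).getLast? with
      | none => simp at hg
      | some top =>
          have ih := stepA_eq (e :: t) c
          simp only [pvStepA, List.getLast?_cons_cons, hg] at ih ⊢
          simp only [pvRpush]
          rw [← ih]
          by_cases hr : react (c, top) = true
          · simp only [if_pos hr]; rfl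
          · simp only [if_neg hr]; rfl

theorem push_rpush (l : List Char) (x c : Char) :
    pvPush x (pvRpush l c) = pvRpush (pvPush x l) c := by
  match l with
  | [] =>
      by_cases h : pvReacts x c = true
      · have h' : pvReacts c x = true := by rw [reacts_symm]; exact h
        simp [pvRpush, pvPush, h, h']
      · have h' : ¬ pvReacts c x = true := by rw [reacts_symm]; exact h
        simp [pvRpush, pvPush, h, h']
  | [d] =>
      by_cases hxd : pvReacts x d = true
      · by_cases hcd : pvReacts c d = true
        · have hxc : x = c := reacts_unique hxd hcd
          subst hxc
          simp [pvRpush, pvPush, hxd]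
        · simp [pvRpush, pvPush, hxd, hcd]
      · by_cases hcd : pvReacts c d = true
        · simp [pvRpush, pvPush, hxd, hcd]
        · simp [pvRpush, pvPush, hxd, hcd]
  | d :: e :: t =>
      by_cases hxd : pvReacts x d = true
      · simp [pvRpush, pvPush, hxd]
      · simp [pvRpush, pvPush, hxd]

theorem nf_snoc : ∀ (l : List Char) (c : Char), pvNF (l ++ [c]) = pvRpush (pvNF l) c
  | [], c => by simp [pvNF, pvPush, pvRpush]
  | x :: l, c => by
      show pvPush x (pvNF (l ++ [c])) = pvRpush (pvPush x (pvNF l)) c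
      rw [nf_snoc l c, push_rpush]

theorem foldl_eq_nf (l : List Char) : l.foldl pvStepA [] = pvNF l := by
  induction l using List.reverseRecOn with
  | nil => rfl
  | append_singleton l c ih =>
      rw [List.foldl_append, List.foldl_cons, List.foldl_nil, stepA_eq, ih, nf_snoc]

-- ===== B side: the sweep loop computes pvNF =====
theorem sweep_nf : ∀ (l : List Char), pvNF (pvSweep l).1 = pvNF l
  | [] => by simp [pvSweep]
  | [x] => by simp [pvSweep]
  | x :: y :: r => by
      by_cases h : pvReacts x y = true
      · simp only [pvSweep, if_pos h]
        rw [sweep_nf r]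
        show pvNF r = pvNF (x :: y :: r)
        have hnf : pvNF (x :: y :: r) = pvPush x (pvPush y (pvNF r)) := rfl
        rw [hnf, push_push_cancel h (noReact_nf r)]
      · simp only [pvSweep, if_neg h]
        show pvPush x (pvNF (pvSweep (y :: r)).1) = pvPush x (pvNF (y :: r))
        rw [sweep_nf (y :: r)]

theorem sweep_false : ∀ (l : List Char), (pvSweep l).2 = false →
    (pvSweep l).1 = l ∧ pvNoReact l = true
  | [], _ => ⟨by simp [pvSweep], by simp [pvNoReact]⟩
  | [x], _ => ⟨by simp [pvSweep], by simp [pvNoReact]⟩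
  | x :: y :: r, h => by
      by_cases hxy : pvReacts x y = true
      · simp [pvSweep, hxy] at h
      · simp only [pvSweep, if_neg hxy] at h ⊢
        obtain ⟨h1, h2⟩ := sweep_false (y :: r) h
        refine ⟨by rw [h1], ?_⟩
        show (!pvReacts x y && pvNoReact (y :: r)) = true
        simp [hxy, h2]

theorem reduceB_eq_nf (l : List Char) : pvReduceB l = pvNF l := by
  by_cases h : (pvSweep l).2 = true
  · rw [pvReduceB, dif_pos h, reduceB_eq_nf (pvSweep l).1, sweep_nf]
  · rw [pvReduceB, dif_neg h]
    obtain ⟨h1, h2⟩ := sweep_false l (by simpa using h)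
    rw [h1, nf_fix h2]
termination_by l.length
decreasing_by exact pvSweep_len_lt l h

-- ===== VERDICT (by name: the statement is the Claim_ definition above) =====
theorem process_stack_spec : Claim_equal_process_stack := by
  intro pattern _
  unfold Spec_process_stack process_stack process_stack_alt
  rw [foldl_eq_nf, reduceB_eq_nf]
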